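-- pv_equiv track=rewrite | github.com/Rilluca/PYP-Assignment---Pet-Daycare | src/pet_owner.py | custom_ord
-- ===== SOURCE A (Python) =====
-- def custom_ord(x):
--     #the same as in custom_chr
--     lookup = " !\"#$%&'()*+,-./0123456789:;<=>?@ABCDEFGHIJKLMNOPQRSTUVWXYZ[\\]^_`abcdefghijklmnopqrstuvwxyz{|}~"
--     #set index at 0
--     index = 0
--     #loop through every character in the lookup string
--     for c in lookup:
--         #if the character matches the input
--         if c == x:
--             #return the index plus the offset of 32
--             return index + 32
--         #move to the next index
--         index += 1
--     #return -1 if the character is not found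
--     return -1
-- ===== SOURCE B (Python) =====
-- def custom_ord(x):
--     # Closed form: the lookup table is exactly contiguous ASCII 32..126,
--     # so a single-character printable string maps to ord(x), anything else to -1.
--     if isinstance(x, str) and len(x) == 1:
--         o = ord(x)
--         return o if 32 <= o <= 126 else -1
--     return -1
-- ===== Notes on version B (the rewrite author's own statement) =====
-- stated objective: idiomatic
-- what changed: Replaced the linear scan of a 95-character lookup table with a closed form over ord: for a single printable-ASCII character return its code point directly, otherwise -1.
import Mathlib
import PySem

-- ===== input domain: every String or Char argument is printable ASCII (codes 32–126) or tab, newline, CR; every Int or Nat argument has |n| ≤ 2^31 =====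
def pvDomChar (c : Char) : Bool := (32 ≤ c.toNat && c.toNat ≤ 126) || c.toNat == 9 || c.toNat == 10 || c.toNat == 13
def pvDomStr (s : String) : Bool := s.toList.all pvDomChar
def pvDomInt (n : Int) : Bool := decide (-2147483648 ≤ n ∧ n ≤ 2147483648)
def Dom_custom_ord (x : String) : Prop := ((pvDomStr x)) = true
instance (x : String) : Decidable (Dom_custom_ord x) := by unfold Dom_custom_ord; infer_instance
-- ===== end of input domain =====

-- B replaces A's linear scan of the 95-character lookup table by the closed form over the
-- character code (the table is exactly contiguous ASCII 32..126); objective: idiomatic.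

-- ===== PORT A =====
-- A's for-loop over the lookup string with a running index; Python compares each
-- one-character string c against x, returning index+32 on the first match, -1 at the end.
def customOrdLoop (l : List Char) (index : Int) (x : String) : Int :=
  match l with
  | [] => -1
  | c :: rest => if String.ofList [c] = x then index + 32 else customOrdLoop rest (index + 1) x

def custom_ord (x : String) : Int :=
  customOrdLoop (" !\"#$%&'()*+,-./0123456789:;<=>?@ABCDEFGHIJKLMNOPQRSTUVWXYZ[\\]^_`abcdefghijklmnopqrstuvwxyz{|}~").toList 0 x

-- ===== PORT B =====
-- Source B: single-character string -> its code point if 32 <= ord <= 126, else -1; otherwise -1.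
def custom_ord_alt (x : String) : Int :=
  match x.toList with
  | [c] => if 32 ≤ c.toNat ∧ c.toNat ≤ 126 then (c.toNat : Int) else -1
  | _ => -1

-- ===== PRECONDITION & SPEC =====
def Spec_custom_ord (x : String) (out : Int) : Prop := out = custom_ord_alt x
instance (x : String) (out : Int) : Decidable (Spec_custom_ord x out) := by unfold Spec_custom_ord; infer_instance

-- ===== CLAIM (what is proved, stated in full; the proofs are below) =====
def Claim_equal_custom_ord : Prop := ∀ (x : String), Dom_custom_ord x → Spec_custom_ord x (custom_ord x)

-- ===== LEMMAS AND PROOFS =====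

lemma lookup_toList :
    (" !\"#$%&'()*+,-./0123456789:;<=>?@ABCDEFGHIJKLMNOPQRSTUVWXYZ[\\]^_`abcdefghijklmnopqrstuvwxyz{|}~").toList
      = (List.range' 32 95).map Char.ofNat := by decide

lemma toNat_ofNat_of_le (a : Nat) (h : a ≤ 126) : (Char.ofNat a).toNat = a := by
  have hv : a.isValidChar := Or.inl (by omega)
  simp [Char.ofNat, hv]

-- If x is not a single-character string, no comparison in the loop ever succeeds.
lemma customOrdLoop_ne (l : List Char) (index : Int) (x : String)
    (h : ∀ ch : Char, x.toList ≠ [ch]) : customOrdLoop l index x = -1 := by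
  induction l generalizing index with
  | nil => rfl
  | cons c rest ih =>
      have hne : String.ofList [c] ≠ x := by
        intro he
        exact h c (by rw [← he]; simp)
      simp [customOrdLoop, hne, ih]

-- Closed form of the loop over a contiguous code block, for a single-character x.
lemma customOrdLoop_range (n : Nat) : ∀ (a : Nat) (x : String) (ch : Char),
    a + n ≤ 127 → x.toList = [ch] →
    customOrdLoop ((List.range' a n).map Char.ofNat) ((a : Int) - 32) x =
      if a ≤ ch.toNat ∧ ch.toNat < a + n then (ch.toNat : Int) else -1 := by
  induction n with
  | zero =>
      intro a x ch _ _
      simp [customOrdLoop]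
  | succ n ih =>
      intro a x ch hle hx
      have hx' : x = String.ofList [ch] := (String.ofList_eq.mpr hx.symm).symm
      by_cases hc : Char.ofNat a = ch
      · have ha : (Char.ofNat a).toNat = a := toNat_ofNat_of_le a (by omega)
        have hch : ch.toNat = a := by rw [← hc, ha]
        have heq : String.ofList [Char.ofNat a] = x := by rw [hx', hc]
        rw [List.range'_succ, List.map_cons]
        simp only [customOrdLoop, if_pos heq]
        have hyes : a ≤ ch.toNat ∧ ch.toNat < a + (n + 1) := by omega
        rw [if_pos hyes, hch]
        omega
      · have hne : String.ofList [Char.ofNat a] ≠ x := by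
          rw [hx']; intro he
          have hl : [Char.ofNat a] = [ch] := by
            have := congrArg String.toList he
            simpa using this
          exact hc (List.head_eq_of_cons_eq hl)
        have hstep : ((a : Int) - 32) + 1 = ((a + 1 : Nat) : Int) - 32 := by push_cast; ring
        rw [List.range'_succ, List.map_cons]
        simp only [customOrdLoop, if_neg hne]
        rw [hstep, ih (a + 1) x ch (by omega) hx]
        have hcha : ch.toNat ≠ a := by
          intro h
          exact hc (by rw [← h, Char.ofNat_toNat])
        have hiff : (a + 1 ≤ ch.toNat ∧ ch.toNat < a + 1 + n) ↔ (a ≤ ch.toNat ∧ ch.toNat < a + (n + 1)) := by omega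
        rw [if_congr hiff rfl rfl]

-- ===== VERDICT (by name: the statement is the Claim_ definition above) =====
theorem custom_ord_spec : Claim_equal_custom_ord := by
  intro x _
  unfold Spec_custom_ord custom_ord custom_ord_alt
  rw [lookup_toList]
  match hx : x.toList with
  | [ch] =>
      have h0 : ((32 : Nat) : Int) - 32 = 0 := by norm_num
      rw [← h0, customOrdLoop_range 95 32 x ch (by omega) hx]
      have : (32 ≤ ch.toNat ∧ ch.toNat < 32 + 95) ↔ (32 ≤ ch.toNat ∧ ch.toNat ≤ 126) := by omega
      simp [this]
  | [] => exact customOrdLoop_ne _ _ _ (by simp [hx])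
  | c1 :: c2 :: rest => exact customOrdLoop_ne _ _ _ (by simp [hx])
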